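-- pv_equiv track=rewrite | github.com/A-Andrews/wash_trading_analysis | plotting_files/extracting_trade_list.py | find_loops
-- ===== SOURCE A (Python) =====
-- def indices(lst, item):
--     return [i for i, x in enumerate(lst) if x == item]
--
-- def find_loops(addresses):
--
--     if len(addresses) == len(set(addresses)): return []
--
--     out = []
--
--     for i, address in enumerate(addresses):
--         indexes = indices(addresses, address)
--         if len(indexes) > 1:
--             for j in indexes:
--                 if j > i:
--                     out.append(addresses[i:j+1])
--
--     return out
-- ===== SOURCE B (Python) =====
-- def find_loops(addresses):
--     # group positions by address, generate occurrence pairs, sort, emit slices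
--     positions = {}
--     for j, a in enumerate(addresses):
--         positions.setdefault(a, []).append(j)
--     pairs = []
--     for ps in positions.values():
--         while ps:
--             i, ps = ps[0], ps[1:]
--             pairs += [(i, j) for j in ps]
--     pairs.sort()
--     return [addresses[i:j + 1] for i, j in pairs]
-- ===== Notes on version B (the rewrite author's own statement) =====
-- stated objective: alternative
-- what changed: B groups positions by address in one pass, generates the occurrence pairs per group, sorts the pairs lexicographically to recover A's emission order, and emits the slices in a final comprehension, instead of A's set() duplicate pre-check and per-element full-list rescans (indices()) that emit slices directly.
import Mathlib
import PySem

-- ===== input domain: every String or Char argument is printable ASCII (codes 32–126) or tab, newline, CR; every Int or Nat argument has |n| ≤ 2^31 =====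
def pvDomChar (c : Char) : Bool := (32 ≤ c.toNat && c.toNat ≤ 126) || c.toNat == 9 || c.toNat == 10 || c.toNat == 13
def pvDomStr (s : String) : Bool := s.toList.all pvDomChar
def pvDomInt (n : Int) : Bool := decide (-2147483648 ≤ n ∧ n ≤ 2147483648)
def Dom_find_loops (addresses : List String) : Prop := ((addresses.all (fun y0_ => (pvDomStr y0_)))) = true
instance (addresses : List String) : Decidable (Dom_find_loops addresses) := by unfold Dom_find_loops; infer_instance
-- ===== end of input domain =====

-- B replaces A's duplicate pre-check and per-element full-list rescans by a different algorithm: group positions by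
-- address once, generate the occurrence pairs per group, sort them lexicographically, then emit the slices; objective: alternative.

-- ===== PORT A =====
-- indices(lst, item) = [i for i, x in enumerate(lst) if x == item]
def pyIndices (lst : List String) (item : String) : List Int :=
  ((PySem.List.enumerate lst).filter (fun p => p.2 == item)).map (fun p => p.1)

def find_loops (addresses : List String) : List (List String) :=
  if addresses.length = (PySem.Set.ofList addresses).length then []
  else
    (PySem.List.enumerate addresses).foldl (fun out p =>
      let indexes := pyIndices addresses p.2
      if indexes.length > 1 then
        indexes.foldl (fun out j =>
          if p.1 < j then out ++ [PySem.List.slice addresses (some p.1) (some (j + 1))] else out) out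
      else out) []

-- ===== PORT B =====
-- the 'while ps: i, ps = ps[0], ps[1:]; pairs += [(i, j) for j in ps]' loop
def pairsOf : List Int → List (Int × Int)
  | [] => []
  | i :: ps => ps.map (fun j => (i, j)) ++ pairsOf ps

def find_loops_alt (addresses : List String) : List (List String) :=
  let positions : PySem.Dict String (List Int) :=
    (PySem.List.enumerate addresses).foldl
      (fun d p => d.modify p.2 ([] : List Int) (fun l => l ++ [p.1])) PySem.Dict.empty
  let pairs := positions.values.foldl (fun acc ps => acc ++ pairsOf ps) []
  (PySem.List.sorted2 pairs Prod.fst Prod.snd false).map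
    (fun p => PySem.List.slice addresses (some p.1) (some (p.2 + 1)))

-- ===== PRECONDITION & SPEC =====
def Spec_find_loops (addresses : List String) (out : List (List String)) : Prop := out = find_loops_alt addresses
instance (addresses : List String) (out : List (List String)) : Decidable (Spec_find_loops addresses out) := by unfold Spec_find_loops; infer_instance

-- ===== CLAIM (what is proved, stated in full; the proofs are below) =====
def Claim_equal_find_loops : Prop := ∀ (addresses : List String), Dom_find_loops addresses → Spec_find_loops addresses (find_loops addresses)

-- ===== LEMMAS AND PROOFS =====

-- the canonical pair list: (i, j) for each i in order, for each later occurrence j of addresses[i], in A's emission order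
def cPairs (xs : List String) : List (Int × Int) :=
  (PySem.List.enumerate xs).flatMap
    (fun p => ((pyIndices xs p.2).filter (fun j => p.1 < j)).map (fun j => (p.1, j)))

def lexlt (p q : Int × Int) : Prop := p.1 < q.1 ∨ (p.1 = q.1 ∧ p.2 < q.2)

-- every enumerate pair's index occurs in its own indices() list
theorem mem_pyIndices (xs : List String) (p : Int × String) (hp : p ∈ PySem.List.enumerate xs) :
    p.1 ∈ pyIndices xs p.2 :=
  List.mem_map.mpr ⟨p, List.mem_filter.mpr ⟨hp, by simp⟩, rfl⟩

theorem mem_pyIndices_iff (xs : List String) (a : String) (k : Int) :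
    k ∈ pyIndices xs a ↔ (k, a) ∈ PySem.List.enumerate xs := by
  unfold pyIndices
  constructor
  · rintro hk
    rcases List.mem_map.mp hk with ⟨p, hp, rfl⟩
    rcases List.mem_filter.mp hp with ⟨hmem, heq⟩
    have : p.2 = a := by simpa using heq
    rwa [show (p.1, a) = p by rw [← this]]
  · intro h
    exact List.mem_map.mpr ⟨(k, a), List.mem_filter.mpr ⟨h, by simp⟩, rfl⟩

theorem pyIndices_pairwise_lt (xs : List String) (a : String) :
    (pyIndices xs a).Pairwise (· < ·) := by
  unfold pyIndices
  exact ((PySem.List.pairwise_lt_enumerate xs 0).filter _).map _ (fun _ _ h => h)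

theorem enumerate_snd_unique (xs : List String) (i : Int) (a b : String)
    (ha : (i, a) ∈ PySem.List.enumerate xs) (hb : (i, b) ∈ PySem.List.enumerate xs) : a = b := by
  rcases (PySem.List.mem_enumerate_iff xs 0 (i, a)).mp ha with ⟨k, hk, hka⟩
  rcases (PySem.List.mem_enumerate_iff xs 0 (i, b)).mp hb with ⟨m, hm, hmb⟩
  have h1 : i = (k : Int) ∧ a = xs[k] := by
    have := Prod.mk.injEq .. ▸ hka; simp at hka; tauto
  have h2 : i = (m : Int) ∧ b = xs[m] := by
    simp at hmb; tauto
  have : k = m := by omega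
  subst this
  rw [h1.2, h2.2]

-- (i, j) ∈ pairsOf l for strictly increasing l ↔ both occur in l and i < j
theorem fst_mem_pairsOf (l : List Int) (i j : Int) (h : (i, j) ∈ pairsOf l) : i ∈ l := by
  induction l with
  | nil => simp [pairsOf] at h
  | cons x ps ih =>
    simp only [pairsOf, List.mem_append, List.mem_map] at h
    rcases h with ⟨y, _, hy⟩ | h
    · simp [← (Prod.mk.injEq ..).mp hy |>.1]
    · exact List.mem_cons_of_mem _ (ih h)

theorem mem_pairsOf_iff (l : List Int) (hl : l.Pairwise (· < ·)) (i j : Int) :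
    (i, j) ∈ pairsOf l ↔ i ∈ l ∧ j ∈ l ∧ i < j := by
  induction l with
  | nil => simp [pairsOf]
  | cons x ps ih =>
    rw [List.pairwise_cons] at hl
    simp only [pairsOf, List.mem_append, List.mem_map, List.mem_cons]
    constructor
    · rintro (⟨y, hy, heq⟩ | h)
      · obtain ⟨rfl, rfl⟩ : x = i ∧ y = j := by
          have := (Prod.mk.injEq ..).mp heq; tauto
        exact ⟨Or.inl rfl, Or.inr hy, hl.1 _ hy⟩
      · have := (ih hl.2).mp h
        tauto
    · rintro ⟨hi, hj, hij⟩
      rcases hi with rfl | hi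
      · rcases hj with rfl | hj
        · omega
        · exact Or.inl ⟨j, hj, rfl⟩
      · rcases hj with rfl | hj
        · exact absurd (hl.1 _ hi) (by omega)
        · exact Or.inr ((ih hl.2).mpr ⟨hi, hj, hij⟩)

theorem pairsOf_nodup (l : List Int) (hl : l.Pairwise (· < ·)) : (pairsOf l).Nodup := by
  induction l with
  | nil => simp [pairsOf]
  | cons x ps ih =>
    rw [List.pairwise_cons] at hl
    refine List.Nodup.append ?_ (ih hl.2) ?_
    · have hps : ps.Nodup := by
        rw [List.Nodup]; exact hl.2.imp (fun h => by omega)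
      exact hps.map (fun a b h => by simpa using (Prod.mk.injEq ..).mp h |>.2)
    · intro p hp hp2
      rcases List.mem_map.mp hp with ⟨y, hy, rfl⟩
      have := fst_mem_pairsOf ps x y hp2
      exact absurd (hl.1 _ this) (by omega)

-- cPairs is strictly lexicographically increasing
theorem cPairs_pairwise (xs : List String) : (cPairs xs).Pairwise lexlt := by
  unfold cPairs
  rw [List.flatMap, List.pairwise_flatten]
  constructor
  · intro l hl
    rcases List.mem_map.mp hl with ⟨p, _, rfl⟩
    refine ((pyIndices_pairwise_lt xs p.2).filter _).map _ ?_
    intro a b h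
    exact Or.inr ⟨rfl, h⟩
  · refine (PySem.List.pairwise_lt_enumerate xs 0).map _ ?_
    intro p q h u hu v hv
    rcases List.mem_map.mp hu with ⟨_, _, rfl⟩
    rcases List.mem_map.mp hv with ⟨_, _, rfl⟩
    exact Or.inl h

theorem cPairs_nodup (xs : List String) : (cPairs xs).Nodup := by
  have h := cPairs_pairwise xs
  rw [List.Nodup]
  refine h.imp ?_ (S := (· ≠ ·))
  rintro ⟨a1, a2⟩ ⟨b1, b2⟩ hl he
  injection he with h1 h2
  simp only [lexlt] at hl
  subst h1; subst h2; omega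

theorem mem_cPairs_iff (xs : List String) (i j : Int) :
    (i, j) ∈ cPairs xs ↔ ∃ a, i ∈ pyIndices xs a ∧ j ∈ pyIndices xs a ∧ i < j := by
  unfold cPairs
  rw [List.mem_flatMap]
  constructor
  · rintro ⟨p, hp, hm⟩
    rcases List.mem_map.mp hm with ⟨j', hj', heq⟩
    obtain ⟨rfl, rfl⟩ : p.1 = i ∧ j' = j := by
      have := (Prod.mk.injEq ..).mp heq; tauto
    rcases List.mem_filter.mp hj' with ⟨hj1, hj2⟩
    exact ⟨p.2, mem_pyIndices xs p hp, hj1, by simpa using hj2⟩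
  · rintro ⟨a, hi, hj, hij⟩
    refine ⟨(i, a), (mem_pyIndices_iff xs a i).mp hi, List.mem_map.mpr ⟨j, List.mem_filter.mpr ⟨hj, by simpa⟩, rfl⟩⟩

-- B's unsorted pair list
def bPairs (xs : List String) : List (Int × Int) :=
  (PySem.Set.ofList xs).flatMap (fun a => pairsOf (pyIndices xs a))

theorem mem_bPairs_iff (xs : List String) (i j : Int) :
    (i, j) ∈ bPairs xs ↔ ∃ a, i ∈ pyIndices xs a ∧ j ∈ pyIndices xs a ∧ i < j := by
  unfold bPairs
  rw [List.mem_flatMap]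
  constructor
  · rintro ⟨a, _, hm⟩
    exact ⟨a, ((mem_pairsOf_iff _ (pyIndices_pairwise_lt xs a) i j).mp hm).imp id id⟩
  · rintro ⟨a, hi, hj, hij⟩
    have haxs : a ∈ xs := by
      have := (mem_pyIndices_iff xs a i).mp hi
      have := (PySem.List.mem_enumerate_iff xs 0 (i, a)).mp this
      rcases this with ⟨k, hk, heq⟩
      have : a = xs[k] := by simp at heq; tauto
      exact this ▸ List.getElem_mem hk
    exact ⟨a, (PySem.Set.mem_ofList xs a).mpr haxs,
      (mem_pairsOf_iff _ (pyIndices_pairwise_lt xs a) i j).mpr ⟨hi, hj, hij⟩⟩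

theorem bPairs_nodup (xs : List String) : (bPairs xs).Nodup := by
  unfold bPairs
  rw [List.flatMap, List.nodup_flatten]
  constructor
  · intro l hl
    rcases List.mem_map.mp hl with ⟨a, _, rfl⟩
    exact pairsOf_nodup _ (pyIndices_pairwise_lt xs a)
  · have hnd : (PySem.Set.ofList xs).Nodup := PySem.Set.nodup_ofList xs
    refine List.Pairwise.map _ ?_ hnd
    intro a b hab p hpa hpb
    rcases p with ⟨i, j⟩
    have h1 := (mem_pyIndices_iff xs a i).mp (fst_mem_pairsOf _ i j hpa)
    have h2 := (mem_pyIndices_iff xs b i).mp (fst_mem_pairsOf _ i j hpb)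
    exact hab (enumerate_snd_unique xs i a b h1 h2)

theorem bPairs_perm_cPairs (xs : List String) : (cPairs xs).Perm (bPairs xs) := by
  refine (List.perm_ext_iff_of_nodup (cPairs_nodup xs) (bPairs_nodup xs)).mpr ?_
  rintro ⟨i, j⟩
  rw [mem_cPairs_iff, mem_bPairs_iff]

-- the comparator Python's tuple sort uses on int pairs, and the lex-≤ relation it keeps sorted
def pairBefore (a b : Int × Int) : Bool := decide (a.1 < b.1) || !decide (b.1 < a.1) && decide (a.2 < b.2)

def lexle (p q : Int × Int) : Prop := ¬ lexlt q p

theorem pairBefore_iff (a b : Int × Int) : pairBefore a b = true ↔ lexlt a b := by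
  simp only [pairBefore, lexlt, Bool.or_eq_true, Bool.and_eq_true, Bool.not_eq_eq_eq_not,
    Bool.not_true, decide_eq_true_eq, decide_eq_false_iff_not]
  omega

theorem insertBy_pairwise (x : Int × Int) (acc : List (Int × Int)) (h : acc.Pairwise lexle) :
    (PySem.List.insertBy pairBefore x acc).Pairwise lexle := by
  induction acc with
  | nil => simp [PySem.List.insertBy]
  | cons y ys ih =>
    rw [List.pairwise_cons] at h
    rw [show PySem.List.insertBy pairBefore x (y :: ys)
        = if pairBefore x y then x :: y :: ys else y :: PySem.List.insertBy pairBefore x ys by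
      simp [PySem.List.insertBy]]
    split_ifs with hb
    · have hxy : lexlt x y := (pairBefore_iff x y).mp hb
      refine List.pairwise_cons.mpr ⟨?_, List.pairwise_cons.mpr h⟩
      intro z hz
      rcases List.mem_cons.mp hz with rfl | hz
      · simp only [lexle, lexlt] at *; omega
      · have := h.1 z hz
        simp only [lexle, lexlt] at *; omega
    · have hxy : ¬ lexlt x y := fun hl => hb ((pairBefore_iff x y).mpr hl)
      refine List.pairwise_cons.mpr ⟨?_, ih h.2⟩
      intro z hz
      rcases (PySem.List.mem_insertBy pairBefore x z ys).mp hz with rfl | hz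
      · simp only [lexle, lexlt] at *; omega
      · exact h.1 z hz

theorem foldl_insertBy_pairwise (l : List (Int × Int)) :
    ∀ acc : List (Int × Int), acc.Pairwise lexle →
      (l.foldl (fun acc x => PySem.List.insertBy pairBefore x acc) acc).Pairwise lexle := by
  induction l with
  | nil => intro acc h; exact h
  | cons x l ih => intro acc h; exact ih _ (insertBy_pairwise x acc h)

-- Python's pairs.sort() on int pairs: any strictly lex-increasing rearrangement is the sorted list
theorem sorted2_int_pairs_eq (xs ys : List (Int × Int)) (hperm : ys.Perm xs)
    (hp : ys.Pairwise lexlt) : PySem.List.sorted2 xs Prod.fst Prod.snd false = ys := by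
  have hperm2 : (PySem.List.sorted2 xs Prod.fst Prod.snd false).Perm ys :=
    (PySem.List.sorted2_perm xs Prod.fst Prod.snd false).trans hperm.symm
  have hs1 : (PySem.List.sorted2 xs Prod.fst Prod.snd false).Pairwise lexle := by
    rw [show PySem.List.sorted2 xs Prod.fst Prod.snd false
        = List.foldl (fun acc x => PySem.List.insertBy pairBefore x acc) [] xs from rfl]
    exact foldl_insertBy_pairwise xs [] (by simp)
  have hs2 : ys.Pairwise lexle := hp.imp (fun {a b} h => by
    simp only [lexle, lexlt] at *; omega)
  refine List.Perm.eq_of_pairwise ?_ hs1 hs2 hperm2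
  rintro ⟨a1, a2⟩ ⟨b1, b2⟩ _ _ h1 h2
  simp only [lexle, lexlt] at h1 h2
  have : a1 = b1 ∧ a2 = b2 := by omega
  simp [this.1, this.2]

theorem filter_enum_len_le_one (xs : List String) (h : xs.Nodup) (a : String) :
    ∀ s : Int, ((PySem.List.enumerate xs s).filter (fun p => p.2 == a)).length ≤ 1 := by
  induction xs with
  | nil => intro s; simp [PySem.List.enumerate]
  | cons x xs ih =>
    intro s
    rw [List.nodup_cons] at h
    rw [PySem.List.enumerate_cons]
    by_cases hx : x = a
    · subst hx
      have hnone : (PySem.List.enumerate xs (s+1)).filter (fun p => p.2 == x) = [] := by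
        rw [List.filter_eq_nil_iff]
        intro p hp
        have : p.2 ∈ xs := by
          have := PySem.List.map_snd_enumerate (xs := xs) (s := s+1)
          exact this ▸ List.mem_map_of_mem hp
        simp
        intro he; exact absurd (he ▸ this) h.1
      simp [hnone]
    · have := ih h.2 (s+1)
      simp only [List.filter_cons]
      have hne : ((s, x).2 == a) = false := by simp [hx]
      rw [hne]
      simpa using this

-- with no duplicates every indices() list has length ≤ 1
theorem pyIndices_len_le_one (xs : List String) (h : xs.Nodup) (a : String) :
    (pyIndices xs a).length ≤ 1 := by
  unfold pyIndices
  rw [List.length_map]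
  exact filter_enum_len_le_one xs h a 0

theorem foldl_add_len (xs : List String) : ∀ (s : PySem.Set String),
    (xs.foldl PySem.Set.add s).length ≤ s.length + xs.length := by
  induction xs with
  | nil => simp
  | cons x xs ih =>
    intro s
    have := ih (PySem.Set.add s x)
    have hadd : (PySem.Set.add s x).length ≤ s.length + 1 := by
      unfold PySem.Set.add; split <;> simp
    simp only [List.foldl_cons, List.length_cons]
    omega

theorem foldl_add_len_lt (xs : List String) : ∀ (s : PySem.Set String),
    ((∃ y ∈ xs, s.contains y = true) ∨ ¬ xs.Nodup) →
    (xs.foldl PySem.Set.add s).length < s.length + xs.length := by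
  induction xs with
  | nil => intro s h; simp at h
  | cons x xs ih =>
    intro s h
    simp only [List.foldl_cons, List.length_cons]
    have hadd : (PySem.Set.add s x).length ≤ s.length + 1 := by
      unfold PySem.Set.add; split <;> simp
    have hmono : ∀ y, s.contains y = true → (PySem.Set.add s x).contains y = true := by
      intro y hy
      unfold PySem.Set.add; split
      · exact hy
      · simp_all
    rcases h with ⟨y, hy, hc⟩ | hnd
    · rcases List.mem_cons.mp hy with rfl | hy'
      · by_cases hcs : s.contains y = true
        · have h1 : PySem.Set.add s y = s := by unfold PySem.Set.add; rw [if_pos hcs]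
          have := foldl_add_len xs s
          rw [h1]; omega
        · exact absurd hc hcs
      · have := ih (PySem.Set.add s x) (Or.inl ⟨y, hy', hmono y hc⟩)
        omega
    · rw [List.nodup_cons] at hnd
      push Not at hnd
      by_cases hx : x ∈ xs
      · have hcx : (PySem.Set.add s x).contains x = true := by
          unfold PySem.Set.add; split
          · assumption
          · simp
        have := ih (PySem.Set.add s x) (Or.inl ⟨x, hx, hcx⟩)
        omega
      · have := ih (PySem.Set.add s x) (Or.inr (hnd hx))
        omega

-- A's duplicate guard: len(addresses) == len(set(addresses)) means Nodup
theorem nodup_of_set_len (xs : List String) (h : xs.length = (PySem.Set.ofList xs).length) :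
    xs.Nodup := by
  by_contra hnd
  have := foldl_add_len_lt xs PySem.Set.empty (Or.inr hnd)
  unfold PySem.Set.ofList at h
  simp [PySem.Set.empty] at this h
  omega

-- a length-≤-1 indices() list contributes no pair
theorem filter_gt_nil (xs : List String) (p : Int × String) (hp : p ∈ PySem.List.enumerate xs)
    (hlen : (pyIndices xs p.2).length ≤ 1) :
    (pyIndices xs p.2).filter (fun j => decide (p.1 < j)) = [] := by
  have hm := mem_pyIndices xs p hp
  match h : pyIndices xs p.2 with
  | [] => simp
  | [j] =>
    rw [h] at hm
    simp at hm
    subst hm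
    simp
  | j :: k :: rest => rw [h] at hlen; simp at hlen

-- A equals the canonical pairs mapped to slices
theorem find_loops_eq_cPairs (xs : List String) :
    find_loops xs = (cPairs xs).map (fun p => PySem.List.slice xs (some p.1) (some (p.2 + 1))) := by
  unfold find_loops cPairs
  rw [List.map_flatMap]
  split_ifs with hguard
  · have hnd := nodup_of_set_len xs hguard
    symm
    rw [List.flatMap_eq_nil_iff]
    intro p hp
    rw [List.map_map, filter_gt_nil xs p hp (pyIndices_len_le_one xs hnd p.2)]
    simp
  · have hstep : (PySem.List.enumerate xs).foldl (fun out p =>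
        let indexes := pyIndices xs p.2
        if indexes.length > 1 then
          indexes.foldl (fun out j =>
            if p.1 < j then out ++ [PySem.List.slice xs (some p.1) (some (j + 1))] else out) out
        else out) []
        = (PySem.List.enumerate xs).foldl (fun out p =>
            out ++ ((pyIndices xs p.2).filter (fun j => decide (p.1 < j))).map
              (fun j => PySem.List.slice xs (some p.1) (some (j + 1)))) [] := by
      apply PySem.List.foldl_congr_mem
      intro acc p hp
      simp only
      split_ifs with hlen
      · exact PySem.List.foldl_append_ite _ _ _ _
      · rw [filter_gt_nil xs p hp (by omega)]
        simp
    rw [hstep, PySem.List.foldl_append_eq_flatMap]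
    simp only [List.nil_append, List.map_map]
    rfl

-- B's dict lookup yields exactly A's indices() list
theorem pos_getD_eq (xs : List String) (a : String) :
    (((PySem.List.enumerate xs).foldl
        (fun d p => d.modify p.2 ([] : List Int) (fun l => l ++ [p.1])) PySem.Dict.empty).getD a [])
      = pyIndices xs a := by
  have h : ((PySem.List.enumerate xs).foldl
        (fun d p => d.modify p.2 ([] : List Int) (fun l => l ++ [p.1])) PySem.Dict.empty)
      = (((PySem.List.enumerate xs).map Prod.swap).foldl
        (fun d p => d.modify p.1 ([] : List Int) (fun l => l ++ [p.2])) PySem.Dict.empty) := by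
    rw [List.foldl_map]; rfl
  rw [h, PySem.Dict.getD_foldl_modify_append, PySem.Dict.getD_empty, List.filter_map]
  simp [pyIndices, Function.comp_def]

-- B equals the canonical pairs mapped to slices
theorem find_loops_alt_eq_cPairs (xs : List String) :
    find_loops_alt xs = (cPairs xs).map (fun p => PySem.List.slice xs (some p.1) (some (p.2 + 1))) := by
  have hgoal : find_loops_alt xs
      = (PySem.List.sorted2 ((((PySem.List.enumerate xs).foldl
          (fun d p => d.modify p.2 ([] : List Int) (fun l => l ++ [p.1]))
          PySem.Dict.empty).values).foldl (fun acc ps => acc ++ pairsOf ps) [])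
          Prod.fst Prod.snd false).map
          (fun p => PySem.List.slice xs (some p.1) (some (p.2 + 1))) := rfl
  rw [hgoal, PySem.List.foldl_append_eq_flatMap, List.nil_append]
  have hnd : (((PySem.List.enumerate xs).foldl
      (fun d p => d.modify p.2 ([] : List Int) (fun l => l ++ [p.1])) PySem.Dict.empty).keys).Nodup := by
    exact PySem.Dict.nodup_keys_foldl_modify_key (PySem.List.enumerate xs) (fun p => p.2) []
      (fun _ p => fun l => l ++ [p.1]) PySem.Dict.empty (by simp [PySem.Dict.empty])
  have hkeys : (((PySem.List.enumerate xs).foldl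
      (fun d p => d.modify p.2 ([] : List Int) (fun l => l ++ [p.1])) PySem.Dict.empty).keys)
      = PySem.Set.ofList xs := by
    rw [PySem.Dict.keys_foldl_modify_key (PySem.List.enumerate xs) (fun p => p.2) []
      (fun _ p => fun l => l ++ [p.1]) PySem.Dict.empty]
    rw [PySem.List.map_snd_enumerate]
    rfl
  rw [PySem.Dict.values_eq_map_keys _ hnd ([] : List Int), hkeys]
  have hget : (PySem.Set.ofList xs).map (fun k =>
      (((PySem.List.enumerate xs).foldl
        (fun d p => d.modify p.2 ([] : List Int) (fun l => l ++ [p.1])) PySem.Dict.empty).getD k []))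
      = (PySem.Set.ofList xs).map (fun k => pyIndices xs k) :=
    List.map_congr_left (fun a _ => pos_getD_eq xs a)
  rw [hget, List.flatMap_map]
  rw [show List.flatMap (fun a => pairsOf (pyIndices xs a)) (PySem.Set.ofList xs) = bPairs xs from rfl,
    sorted2_int_pairs_eq (bPairs xs) (cPairs xs) (bPairs_perm_cPairs xs) (cPairs_pairwise xs)]

-- ===== VERDICT (by name: the statement is the Claim_ definition above) =====
theorem find_loops_spec : Claim_equal_find_loops := by
  intro xs _
  unfold Spec_find_loops
  rw [find_loops_eq_cPairs, find_loops_alt_eq_cPairs]
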